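-- pv_equiv track=rewrite | github.com/slavashestakov2005/SlavaScript_on_C | py/sort_includes.py | get_includes
-- ===== SOURCE A (Python) =====
-- def is_system(include):
--     if include == '<windows.h>':
--         return True
--     if include.startswith('<SFML/'):
--         return True
--     if '.h' not in include:
--         return True
--     return False
--
-- def get_includes(lines):
--     includes_system = []
--     includes_own = []
--     ending = []
--     heading = True
--     for line in lines:
--         if heading:
--             text = line.strip()
--             if len(text) == 0:
--                 continue
--             elif text.startswith('//'):
--                 continue
--             elif text == '#pragma once':
--                 continue
--             elif text.startswith('#include'):
--                 include = text.split('#include')[-1].strip()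
--                 if is_system(include):
--                     includes_system.append(include)
--                 else:
--                     includes_own.append(include)
--             else:
--                 heading = False
--         if not heading:
--             ending.append(line)
--     while len(ending) and len(ending[-1].strip()) == 0:
--         ending.pop()
--     return includes_system, includes_own, ending
-- ===== SOURCE B (Python) =====
-- def is_system(include):
--     if include == '<windows.h>':
--         return True
--     if include.startswith('<SFML/'):
--         return True
--     if '.h' not in include:
--         return True
--     return False
--
--
-- def _is_heading(text):
--     return (not text or text.startswith('//') or text == '#pragma once'
--             or text.startswith('#include'))
--
--
-- def get_includes(lines):
--     # index of the first body line (every earlier line is a heading line)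
--     split = next((i for i, line in enumerate(lines)
--                   if not _is_heading(line.strip())), len(lines))
--     incs = [line.strip().split('#include')[-1].strip()
--             for line in lines[:split] if line.strip().startswith('#include')]
--     includes_system = [inc for inc in incs if is_system(inc)]
--     includes_own = [inc for inc in incs if not is_system(inc)]
--     ending = lines[split:]
--     # find the cut index past the last non-blank body line, no pops
--     k = len(ending)
--     while k and not ending[k - 1].strip():
--         k -= 1
--     return includes_system, includes_own, ending[:k]
-- ===== Notes on version B (the rewrite author's own statement) =====
-- stated objective: alternative
-- what changed: A's single pass with a mutable 'heading' flag and per-line appends (plus a pop-loop trimming the body) is replaced by first computing the split index of the first body line, then building the include lists by filter/map comprehensions over the heading slice and the body by index-trimmed slicing, with no mutable flag or pops.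
import Mathlib
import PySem

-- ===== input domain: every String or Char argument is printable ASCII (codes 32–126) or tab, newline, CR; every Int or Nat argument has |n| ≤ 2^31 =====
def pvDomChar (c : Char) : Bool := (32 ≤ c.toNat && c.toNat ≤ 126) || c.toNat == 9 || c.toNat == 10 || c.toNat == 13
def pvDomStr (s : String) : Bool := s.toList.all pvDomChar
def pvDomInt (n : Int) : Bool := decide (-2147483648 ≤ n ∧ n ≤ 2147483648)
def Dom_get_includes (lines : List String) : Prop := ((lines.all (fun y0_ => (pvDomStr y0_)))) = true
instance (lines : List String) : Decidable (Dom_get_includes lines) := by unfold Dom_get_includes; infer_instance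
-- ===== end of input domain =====

-- B replaces A's stateful heading-flag loop by a split-index computation plus slices/comprehensions (alternative decomposition, same cost).


-- ===== PORT A =====
def is_system_A (inc : String) : Bool :=
  if inc == "<windows.h>" then true
  else if PySem.Str.startswith inc "<SFML/" then true
  else if !(PySem.Str.isIn ".h" inc) then true
  else false

-- text.split('#include')[-1].strip()  (split? is some: the separator is non-empty; [-1] via pyGetD: the list is non-empty)
def extract_A (text : String) : String :=
  PySem.Str.strip (PySem.List.pyGetD ((PySem.Str.split? text "#include").getD []) (-1) "")

-- the for-loop with the 'heading' flag; appends become conses in front of the recursive result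
def loop_A : List String → Bool → List String × List String × List String
  | [], _ => ([], [], [])
  | line :: rest, heading =>
    if heading then
      let text := PySem.Str.strip line
      if PySem.Str.len text == 0 then loop_A rest true
      else if PySem.Str.startswith text "//" then loop_A rest true
      else if text == "#pragma once" then loop_A rest true
      else if PySem.Str.startswith text "#include" then
        let inc := extract_A text
        let r := loop_A rest true
        if is_system_A inc then (inc :: r.1, r.2.1, r.2.2) else (r.1, inc :: r.2.1, r.2.2)
      else  -- heading = False, then 'if not heading: ending.append(line)' fires
        let r := loop_A rest false
        (r.1, r.2.1, line :: r.2.2)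
    else
      let r := loop_A rest false
      (r.1, r.2.1, line :: r.2.2)

-- while len(ending) and len(ending[-1].strip()) == 0: ending.pop()
def trim_A (e : List String) : List String :=
  if h : e ≠ [] ∧ PySem.Str.len (PySem.Str.strip (PySem.List.pyGetD e (-1) "")) == 0 then
    trim_A e.dropLast
  else e
termination_by e.length
decreasing_by
  rcases h with ⟨hne, -⟩
  have : e.length ≠ 0 := fun h0 => hne (List.eq_nil_of_length_eq_zero h0)
  simp [List.length_dropLast]; omega

def get_includes (lines : List String) : List String × List String × List String :=
  let r := loop_A lines true
  (r.1, r.2.1, trim_A r.2.2)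

-- ===== PORT B =====
def is_system_B (inc : String) : Bool :=
  if inc == "<windows.h>" then true
  else if PySem.Str.startswith inc "<SFML/" then true
  else if !(PySem.Str.isIn ".h" inc) then true
  else false

def is_heading_B (text : String) : Bool :=
  PySem.Str.len text == 0 || PySem.Str.startswith text "//" || text == "#pragma once"
    || PySem.Str.startswith text "#include"

-- next((i for i, line in enumerate(lines) if not _is_heading(line.strip())), len(lines))
def split_idx_B : List String → Nat
  | [] => 0
  | line :: rest => if is_heading_B (PySem.Str.strip line) then split_idx_B rest + 1 else 0

def extract_B (text : String) : String :=
  PySem.Str.strip (PySem.List.pyGetD ((PySem.Str.split? text "#include").getD []) (-1) "")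

-- while k and not ending[k-1].strip(): k -= 1
def trim_k_B (e : List String) : Nat → Nat
  | 0 => 0
  | k + 1 =>
    if PySem.Str.len (PySem.Str.strip (e.getD k "")) == 0 then trim_k_B e k else k + 1

def get_includes_alt (lines : List String) : List String × List String × List String :=
  let split := split_idx_B lines
  let incs := ((PySem.List.slice lines none (some (split : Int))).filter
                 (fun line => PySem.Str.startswith (PySem.Str.strip line) "#include")).map
              (fun line => extract_B (PySem.Str.strip line))
  let includes_system := incs.filter (fun inc => is_system_B inc)
  let includes_own := incs.filter (fun inc => !is_system_B inc)
  let ending := PySem.List.slice lines (some (split : Int)) none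
  let k := trim_k_B ending ending.length
  (includes_system, includes_own, PySem.List.slice ending none (some (k : Int)))

-- ===== PRECONDITION & SPEC =====
def Spec_get_includes (lines : List String) (out : List String × List String × List String) : Prop := out = get_includes_alt lines
instance (lines : List String) (out : List String × List String × List String) : Decidable (Spec_get_includes lines out) := by unfold Spec_get_includes; infer_instance

-- ===== CLAIM (what is proved, stated in full; the proofs are below) =====
def Claim_equal_get_includes : Prop := ∀ (lines : List String), Dom_get_includes lines → Spec_get_includes lines (get_includes lines)

-- ===== LEMMAS AND PROOFS =====

theorem is_system_AB : is_system_A = is_system_B := rfl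
theorem extract_AB : extract_A = extract_B := rfl

-- a blank stripped line does not start with '#include'
theorem not_include_of_blank (t : String) (h : (PySem.Str.len t == 0) = true) :
    PySem.Str.startswith t "#include" = false := by
  simp only [PySem.Str.startswith_eq, PySem.Str.len_eq] at *
  rcases ht : t.toList with _ | ⟨c, cs⟩
  · decide
  · simp [ht] at h; omega

-- a '//' comment does not start with '#include'
theorem not_include_of_comment (t : String) (h : PySem.Str.startswith t "//" = true) :
    PySem.Str.startswith t "#include" = false := by
  simp only [PySem.Str.startswith_eq] at *
  rw [PySem.Chars.startswith_iff] at h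
  by_contra hc
  rw [Bool.not_eq_false, PySem.Chars.startswith_iff] at hc
  rcases h with ⟨r1, h1⟩
  rcases hc with ⟨r2, h2⟩
  rw [← h1] at h2
  simp at h2

theorem loop_A_false (l : List String) : loop_A l false = ([], [], l) := by
  induction l with
  | nil => simp [loop_A]
  | cons x xs ih => simp [loop_A, ih]

def incs_of (l : List String) : List String :=
  ((l.take (split_idx_B l)).filter
      (fun line => PySem.Str.startswith (PySem.Str.strip line) "#include")).map
    (fun line => extract_A (PySem.Str.strip line))

theorem loop_A_true (l : List String) :
    loop_A l true =
      ((incs_of l).filter (fun inc => is_system_A inc),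
       (incs_of l).filter (fun inc => !is_system_A inc),
       l.drop (split_idx_B l)) := by
  induction l with
  | nil => simp [loop_A, split_idx_B, incs_of]
  | cons line rest ih =>
    by_cases h1 : (PySem.Str.len (PySem.Str.strip line) == 0) = true
    · have hni := not_include_of_blank _ h1
      have hniC : PySem.Chars.startswith (PySem.Chars.strip line.toList)
          ['#', 'i', 'n', 'c', 'l', 'u', 'd', 'e'] = false := by simpa using hni
      have hh : is_heading_B (PySem.Str.strip line) = true := by
        simp only [is_heading_B, h1, Bool.true_or]
      have hsp : split_idx_B (line :: rest) = split_idx_B rest + 1 := by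
        simp only [split_idx_B, hh, if_true]
      have hinc : incs_of (line :: rest) = incs_of rest := by
        simp [incs_of, hsp, hniC]
      simp only [loop_A, h1, if_true, hinc, hsp, List.drop_succ_cons]
      exact ih
    · by_cases h2 : PySem.Str.startswith (PySem.Str.strip line) "//" = true
      · have hni := not_include_of_comment _ h2
        have hniC : PySem.Chars.startswith (PySem.Chars.strip line.toList)
            ['#', 'i', 'n', 'c', 'l', 'u', 'd', 'e'] = false := by simpa using hni
        have hh : is_heading_B (PySem.Str.strip line) = true := by
          simp only [is_heading_B, h2, Bool.true_or, Bool.or_true]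
        have hsp : split_idx_B (line :: rest) = split_idx_B rest + 1 := by
          simp only [split_idx_B, hh, if_true]
        have hinc : incs_of (line :: rest) = incs_of rest := by
          simp [incs_of, hsp, hniC]
        simp only [loop_A, h1, h2, if_true, if_false, Bool.false_eq_true, hinc, hsp,
          List.drop_succ_cons]
        exact ih
      · by_cases h3 : (PySem.Str.strip line == "#pragma once") = true
        · have hni : PySem.Str.startswith (PySem.Str.strip line) "#include" = false := by
            rw [eq_of_beq h3]; decide
          have hniC : PySem.Chars.startswith (PySem.Chars.strip line.toList)
              ['#', 'i', 'n', 'c', 'l', 'u', 'd', 'e'] = false := by simpa using hni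
          have hh : is_heading_B (PySem.Str.strip line) = true := by
            simp only [is_heading_B, h3, Bool.true_or, Bool.or_true]
          have hsp : split_idx_B (line :: rest) = split_idx_B rest + 1 := by
            simp only [split_idx_B, hh, if_true]
          have hinc : incs_of (line :: rest) = incs_of rest := by
            simp [incs_of, hsp, hniC]
          simp only [loop_A, h1, h2, h3, if_true, if_false, Bool.false_eq_true, hinc, hsp,
            List.drop_succ_cons]
          exact ih
        · by_cases h4 : PySem.Str.startswith (PySem.Str.strip line) "#include" = true
          · have h4C : PySem.Chars.startswith (PySem.Chars.strip line.toList)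
                ['#', 'i', 'n', 'c', 'l', 'u', 'd', 'e'] = true := by simpa using h4
            have hh : is_heading_B (PySem.Str.strip line) = true := by
              simp only [is_heading_B, h4, Bool.true_or, Bool.or_true]
            have hsp : split_idx_B (line :: rest) = split_idx_B rest + 1 := by
              simp only [split_idx_B, hh, if_true]
            have hinc : incs_of (line :: rest) =
                extract_A (PySem.Str.strip line) :: incs_of rest := by
              simp [incs_of, hsp, h4C]
            simp only [loop_A, h1, h2, h3, h4, if_true, if_false, Bool.false_eq_true, ih,
              hinc, hsp, List.drop_succ_cons, List.filter_cons]
            by_cases hs : is_system_A (extract_A (PySem.Str.strip line)) = true <;>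
              simp [hs]
          · rw [Bool.not_eq_true] at h1 h2 h3 h4
            have hh : is_heading_B (PySem.Str.strip line) = false := by
              simp only [is_heading_B, h1, h2, h3, h4, Bool.or_self]
            have hsp : split_idx_B (line :: rest) = 0 := by
              simp only [split_idx_B, hh, Bool.false_eq_true, if_false]
            have hinc : incs_of (line :: rest) = [] := by simp [incs_of, hsp]
            have h1C : ¬ PySem.Chars.strip line.toList = [] := by simpa using h1
            have h2C : PySem.Chars.startswith (PySem.Chars.strip line.toList)
                ['/', '/'] = false := by simpa using h2
            have h4C : PySem.Chars.startswith (PySem.Chars.strip line.toList)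
                ['#', 'i', 'n', 'c', 'l', 'u', 'd', 'e'] = false := by simpa using h4
            simp [loop_A, h1C, h2C, h3, h4C, loop_A_false, hinc, hsp]

theorem trim_eq (e : List String) : ∀ j, j ≤ e.length →
    trim_A (e.take j) = e.take (trim_k_B e j) := by
  intro j
  induction j with
  | zero => intro _; rw [trim_A]; simp [trim_k_B]
  | succ k ih =>
    intro hle
    have hne : e.take (k + 1) ≠ [] := by
      intro hcon
      have hcl : (e.take (k + 1)).length = 0 := by rw [hcon]; rfl
      rw [List.length_take] at hcl
      omega
    have hlen : (e.take (k + 1)).length = k + 1 := by simp; omega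
    have hk : k < e.length := by omega
    have hlast : PySem.List.pyGetD (e.take (k + 1)) (-1) "" = e.getD k "" := by
      rw [PySem.List.pyGetD_neg_one _ _ hne, List.getLast_eq_getElem, List.getD_eq_getElem e "" hk]
      simp [hlen]
    have hdl : (e.take (k + 1)).dropLast = e.take k := by
      rw [List.dropLast_eq_take, hlen]
      simp [List.take_take]
    rw [trim_A]
    by_cases hb : (PySem.Str.len (PySem.Str.strip (e.getD k "")) == 0) = true
    · rw [dif_pos ⟨hne, by rw [hlast]; exact hb⟩, hdl]
      have : trim_k_B e (k + 1) = trim_k_B e k := by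
        simp only [trim_k_B, hb, if_true]
      rw [this]
      exact ih (by omega)
    · rw [dif_neg (fun hcon => hb (by rw [← hlast]; exact hcon.2))]
      rw [Bool.not_eq_true] at hb
      have : trim_k_B e (k + 1) = k + 1 := by
        simp only [trim_k_B, hb, Bool.false_eq_true, if_false]
      rw [this]

-- ===== VERDICT (by name: the statement is the Claim_ definition above) =====
theorem get_includes_spec : Claim_equal_get_includes := by
  intro lines _
  show get_includes lines = get_includes_alt lines
  rw [get_includes, get_includes_alt, loop_A_true]
  simp only [PySem.List.slice_to_natCast, PySem.List.slice_from_natCast]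
  have h := trim_eq (lines.drop (split_idx_B lines)) (lines.drop (split_idx_B lines)).length le_rfl
  rw [List.take_length] at h
  simp only [incs_of, is_system_AB, extract_AB, h]
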